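-- pv_equiv track=rewrite | github.com/nataliafonseca/etl_folha | script/script.py | get_cod_faixa
-- ===== SOURCE A (Python) =====
-- def get_cod_faixa(idade_colab):
--     list_cod_faixa = []
--     for idade in idade_colab:
--         if idade < 21:
--             list_cod_faixa.append(1)
--         elif idade <= 30:
--             list_cod_faixa.append(2)
--         elif idade <= 45:
--             list_cod_faixa.append(3)
--         else:
--             list_cod_faixa.append(4)
--     return list_cod_faixa
-- ===== SOURCE B (Python) =====
-- import bisect
--
-- _BOUNDS = [21, 31, 46]
-- _CODES = [1, 2, 3, 4]
--
-- def get_cod_faixa(idade_colab):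
--     return [_CODES[bisect.bisect_right(_BOUNDS, idade)] for idade in idade_colab]
-- ===== Notes on version B (the rewrite author's own statement) =====
-- stated objective: idiomatic
-- what changed: Replaces the sequential if/elif comparison chain and accumulator loop with a list comprehension mapping each age through a binary search (bisect_right) over a precomputed threshold table indexing into a code table.
import Mathlib
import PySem

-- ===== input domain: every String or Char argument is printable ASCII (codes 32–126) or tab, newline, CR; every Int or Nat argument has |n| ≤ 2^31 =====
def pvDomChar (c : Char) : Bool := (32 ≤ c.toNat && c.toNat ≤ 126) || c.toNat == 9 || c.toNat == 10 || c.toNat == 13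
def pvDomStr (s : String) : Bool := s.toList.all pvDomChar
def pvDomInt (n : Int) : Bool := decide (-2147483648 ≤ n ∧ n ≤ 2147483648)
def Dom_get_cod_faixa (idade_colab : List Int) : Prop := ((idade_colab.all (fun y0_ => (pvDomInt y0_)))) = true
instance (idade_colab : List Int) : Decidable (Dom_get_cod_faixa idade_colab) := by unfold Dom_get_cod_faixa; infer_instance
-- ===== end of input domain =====

-- B: maps each age through a bisect_right binary search over a threshold table instead of A's if/elif chain (idiomatic alternative).


-- ===== PORT A =====
-- cons-recursion over the ages with the if/elif chain, building the list left to right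
def get_cod_faixa (idade_colab : List Int) : List Int :=
  match idade_colab with
  | [] => []
  | idade :: rest =>
      (if idade < 21 then (1 : Int)
       else if idade ≤ 30 then 2
       else if idade ≤ 45 then 3
       else 4) :: get_cod_faixa rest

-- ===== PORT B =====
-- binary search (Python bisect.bisect_right) over [lo, hi)
def bisectRightGo (xs : List Int) (x : Int) (lo hi : Nat) : Nat :=
  if h : lo < hi then
    let mid := (lo + hi) / 2
    if x < xs.getD mid 0 then bisectRightGo xs x lo mid
    else bisectRightGo xs x (mid + 1) hi
  else lo
termination_by hi - lo
decreasing_by all_goals omega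

def bisectRight (xs : List Int) (x : Int) : Nat :=
  bisectRightGo xs x 0 xs.length

def pvBounds : List Int := [21, 31, 46]
def pvCodes : List Int := [1, 2, 3, 4]

def get_cod_faixa_alt (idade_colab : List Int) : List Int :=
  idade_colab.map (fun idade => pvCodes.getD (bisectRight pvBounds idade) 0)

-- ===== PRECONDITION & SPEC =====
def Spec_get_cod_faixa (idade_colab : List Int) (out : List Int) : Prop := out = get_cod_faixa_alt idade_colab
instance (idade_colab : List Int) (out : List Int) : Decidable (Spec_get_cod_faixa idade_colab out) := by unfold Spec_get_cod_faixa; infer_instance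

-- ===== CLAIM (what is proved, stated in full; the proofs are below) =====
def Claim_equal_get_cod_faixa : Prop := ∀ (idade_colab : List Int), Dom_get_cod_faixa idade_colab → Spec_get_cod_faixa idade_colab (get_cod_faixa idade_colab)

-- ===== LEMMAS AND PROOFS =====

-- ===== VERDICT (by name: the statement is the Claim_ definition above) =====
lemma bisect_lt21 (idade : Int) (h1 : idade < 21) : bisectRightGo [21,31,46] idade 0 3 = 0 := by
  rw [bisectRightGo.eq_def]; norm_num
  rw [if_pos (by omega : idade < 31)]
  rw [bisectRightGo.eq_def]; norm_num
  rw [if_pos h1]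
  rw [bisectRightGo.eq_def]; norm_num

lemma bisect_band2 (idade : Int) (h1 : ¬ idade < 21) (h2 : idade ≤ 30) :
    bisectRightGo [21,31,46] idade 0 3 = 1 := by
  rw [bisectRightGo.eq_def]; norm_num
  rw [if_pos (by omega : idade < 31)]
  rw [bisectRightGo.eq_def]; norm_num
  rw [if_neg h1]
  rw [bisectRightGo.eq_def]; norm_num

lemma bisect_band3 (idade : Int) (h2 : ¬ idade ≤ 30) (h3 : idade ≤ 45) :
    bisectRightGo [21,31,46] idade 0 3 = 2 := by
  rw [bisectRightGo.eq_def]; norm_num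
  rw [if_neg (by omega : ¬ idade < 31)]
  rw [bisectRightGo.eq_def]; norm_num
  rw [if_pos (by omega : idade < 46)]
  rw [bisectRightGo.eq_def]; norm_num

lemma bisect_band4 (idade : Int) (h3 : ¬ idade ≤ 45) :
    bisectRightGo [21,31,46] idade 0 3 = 3 := by
  rw [bisectRightGo.eq_def]; norm_num
  rw [if_neg (by omega : ¬ idade < 31)]
  rw [bisectRightGo.eq_def]; norm_num
  rw [if_neg (by omega : ¬ idade < 46)]
  rw [bisectRightGo.eq_def]; norm_num

lemma band_eq (idade : Int) :
    pvCodes.getD (bisectRight pvBounds idade) 0 =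
      (if idade < 21 then (1 : Int) else if idade ≤ 30 then 2 else if idade ≤ 45 then 3 else 4) := by
  unfold bisectRight pvBounds pvCodes
  simp only [List.length_cons, List.length_nil]
  by_cases h1 : idade < 21
  · rw [bisect_lt21 idade h1]; simp [h1]
  · by_cases h2 : idade ≤ 30
    · rw [bisect_band2 idade h1 h2]; simp [h1, h2]
    · by_cases h3 : idade ≤ 45
      · rw [bisect_band3 idade h2 h3]; simp [h1, h2, h3]
      · rw [bisect_band4 idade h3]; simp [h1, h2, h3]

theorem get_cod_faixa_spec : Claim_equal_get_cod_faixa := by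
  intro xs hdom
  clear hdom
  unfold Spec_get_cod_faixa get_cod_faixa_alt
  induction xs with
  | nil => simp [get_cod_faixa]
  | cons a rest ih =>
      simp only [get_cod_faixa, List.map_cons]
      rw [band_eq a, ih]
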